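-- pv_equiv track=rewrite | github.com/palinkasnorbert/python_snippets | message_decoder.py | sort_group_words
-- ===== SOURCE A (Python) =====
-- def sort_group_words(code_dict: dict) -> list:
--     sorted_dict = dict(sorted(code_dict.items()))  # sort dict by keys
--
--     word_list = list(sorted_dict.values())  # create word list from sorted
--
--     step = 1    # set step counter
--     subsets = []    # init subsets list
--
--     while len(word_list) != 0:  # while the word list is longer than 0
--         if len(word_list) >= step:  # if the word list is longer than step
--             subsets.append(
--                 word_list[0:step]
--             )  # append word list items from 0 to step to subsets
--             word_list = word_list[step:]  # shorten the word list with slicing starting from step until end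
--             step += 1   # add 1 to the counter
--         else:
--             subsets.append(word_list[0:step])
--             word_list = []
--     return subsets
-- ===== SOURCE B (Python) =====
-- def sort_group_words(code_dict: dict) -> list:
--     subsets = []
--     cur = []
--     cap = 1
--     for _, w in sorted(code_dict.items()):
--         cur.append(w)
--         if len(cur) == cap:
--             subsets.append(cur)
--             cur = []
--             cap += 1
--     if cur:
--         subsets.append(cur)
--     return subsets
-- ===== Notes on version B (the rewrite author's own statement) =====
-- stated objective: faster
-- what changed: B makes one pass over the sorted words with an accumulator (current chunk + capacity counter), instead of A's while loop that slices off and recopies the remaining list on every iteration.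
import Mathlib
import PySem

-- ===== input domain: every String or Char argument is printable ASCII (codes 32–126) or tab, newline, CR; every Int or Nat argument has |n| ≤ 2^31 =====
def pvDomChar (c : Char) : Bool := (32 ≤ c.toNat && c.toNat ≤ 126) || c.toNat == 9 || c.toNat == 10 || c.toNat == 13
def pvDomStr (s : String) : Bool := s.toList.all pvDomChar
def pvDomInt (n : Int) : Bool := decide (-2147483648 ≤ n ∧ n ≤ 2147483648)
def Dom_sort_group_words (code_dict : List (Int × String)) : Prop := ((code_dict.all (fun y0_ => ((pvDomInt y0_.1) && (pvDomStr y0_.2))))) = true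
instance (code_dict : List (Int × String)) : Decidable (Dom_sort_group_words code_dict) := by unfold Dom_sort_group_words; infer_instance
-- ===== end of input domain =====

-- B replaces A's slice-and-recopy while loop by a single accumulator pass over the sorted words.

-- ===== PORT A =====
-- A's while loop; fuel = word_list.length + 1 is enough since step ≥ 1 shortens the list each pass
def sortGroupLoopA (fuel : Nat) (word_list : List String) (step : Int) : List (List String) :=
  match fuel with
  | 0 => []
  | Nat.succ f =>
    if word_list.length ≠ 0 then                       -- while len(word_list) != 0
      if step ≤ (word_list.length : Int) then          -- if len(word_list) >= step
        PySem.List.slice word_list (some 0) (some step) ::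
          sortGroupLoopA f (PySem.List.slice word_list (some step) none) (step + 1)
      else
        [PySem.List.slice word_list (some 0) (some step)]   -- append, then word_list = [] ends the loop
    else []

def sort_group_words (code_dict : List (Int × String)) : List (List String) :=
  let sorted_items := PySem.List.sorted2 code_dict (fun p => p.1) (fun p => p.2) false
  let word_list := sorted_items.map (fun p => p.2)
  sortGroupLoopA (word_list.length + 1) word_list 1

-- ===== PORT B =====
-- one iteration of B's for loop: append w to cur; if cur is full, emit it and bump the capacity
def stepB (st : List (List String) × List String × Nat) (w : String) :
    List (List String) × List String × Nat :=
  let cur' := st.2.1 ++ [w]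
  if cur'.length = st.2.2 then (st.1 ++ [cur'], [], st.2.2 + 1) else (st.1, cur', st.2.2)

-- B's trailing 'if cur: subsets.append(cur)'
def finB (st : List (List String) × List String × Nat) : List (List String) :=
  if st.2.1 ≠ [] then st.1 ++ [st.2.1] else st.1

def sort_group_words_alt (code_dict : List (Int × String)) : List (List String) :=
  let words := (PySem.List.sorted2 code_dict (fun p => p.1) (fun p => p.2) false).map (fun p => p.2)
  finB (List.foldl stepB ([], [], 1) words)

-- ===== PRECONDITION & SPEC =====
def Spec_sort_group_words (code_dict : List (Int × String)) (out : List (List String)) : Prop := out = sort_group_words_alt code_dict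
instance (code_dict : List (Int × String)) (out : List (List String)) : Decidable (Spec_sort_group_words code_dict out) := by unfold Spec_sort_group_words; infer_instance

-- ===== CLAIM (what is proved, stated in full; the proofs are below) =====
def Claim_equal_sort_group_words : Prop := ∀ (code_dict : List (Int × String)), Dom_sort_group_words code_dict → Spec_sort_group_words code_dict (sort_group_words code_dict)

-- ===== LEMMAS AND PROOFS =====

-- reference chunking: successive chunks of sizes s+1, s+2, …
def chunksRef (ws : List String) (s : Nat) : List (List String) :=
  if h : ws = [] then [] else ws.take (s + 1) :: chunksRef (ws.drop (s + 1)) (s + 1)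
termination_by ws.length
decreasing_by
  have : ws.length ≠ 0 := fun hl => h (List.eq_nil_of_length_eq_zero hl)
  simp; omega

lemma loopA_eq_chunksRef (fuel : Nat) : ∀ (ws : List String) (s : Nat),
    ws.length + 1 ≤ fuel →
    sortGroupLoopA fuel ws ((s + 1 : Nat) : Int) = chunksRef ws s := by
  induction fuel with
  | zero => intro ws s h; omega
  | succ f ih =>
    intro ws s hf
    by_cases hne : ws = []
    · subst hne; simp [sortGroupLoopA, chunksRef]
    · have hlen : ws.length ≠ 0 := fun hl => hne (List.eq_nil_of_length_eq_zero hl)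
      by_cases hs : s + 1 ≤ ws.length
      · have hsle : ((s + 1 : Nat) : Int) ≤ (ws.length : Int) := by exact_mod_cast hs
        have hc : (((s + 1 : Nat) : Int) + 1) = ((s + 1 + 1 : Nat) : Int) := by push_cast; ring
        conv_rhs => rw [chunksRef]
        rw [sortGroupLoopA, if_pos hlen, if_pos hsle, PySem.List.slice_zero_start,
          PySem.List.slice_to_natCast, PySem.List.slice_from_natCast, hc,
          ih (ws.drop (s + 1)) (s + 1) (by simp; omega), dif_neg hne]
      · have hsgt : ¬ (((s + 1 : Nat) : Int) ≤ (ws.length : Int)) := by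
          push_cast; omega
        have hdrop : ws.drop (s + 1) = [] := List.drop_eq_nil_of_le (by omega)
        conv_rhs => rw [chunksRef]
        rw [sortGroupLoopA, if_pos hlen, if_neg hsgt, PySem.List.slice_zero_start,
          PySem.List.slice_to_natCast, dif_neg hne, hdrop, chunksRef]
        simp

lemma foldB_eq (ws : List String) : ∀ (cur : List String) (s : Nat) (acc : List (List String)),
    cur.length ≤ s →
    finB (List.foldl stepB (acc, cur, s + 1) ws) =
      acc ++ (if cur = [] ∧ ws = [] then []
              else (cur ++ ws.take (s + 1 - cur.length)) ::
                chunksRef (ws.drop (s + 1 - cur.length)) (s + 1)) := by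
  induction ws with
  | nil =>
    intro cur s acc _
    by_cases hc : cur = []
    · subst hc; simp [finB]
    · simp [finB, hc, chunksRef]
  | cons w ws ih =>
    intro cur s acc hcur
    by_cases hfull : cur.length + 1 = s + 1
    · have hstep : stepB (acc, cur, s + 1) w = (acc ++ [cur ++ [w]], [], s + 2) := by
        simp [stepB]; omega
      have hto : s + 1 - cur.length = 1 := by omega
      rw [List.foldl_cons, hstep, ih [] (s + 1) (acc ++ [cur ++ [w]]) (by simp)]
      by_cases hw : ws = []
      · subst hw; simp [hto, chunksRef]
      · conv_rhs => rw [show s + 1 - cur.length = 1 from hto]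
        simp only [List.take_succ_cons, List.take_zero, List.drop_succ_cons, List.drop_zero]
        conv_rhs => rw [chunksRef]
        simp [hw]
    · have hstep : stepB (acc, cur, s + 1) w = (acc, cur ++ [w], s + 1) := by
        simp [stepB]; omega
      have hle : (cur ++ [w]).length ≤ s := by
        simp only [List.length_append, List.length_cons, List.length_nil]; omega
      rw [List.foldl_cons, hstep, ih (cur ++ [w]) s acc hle]
      have h2 : s + 1 - cur.length = (s - cur.length) + 1 := by omega
      simp [h2, List.append_assoc]

lemma main_eq (words : List String) :
    sortGroupLoopA (words.length + 1) words 1 = finB (List.foldl stepB ([], [], 1) words) := by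
  have hA : sortGroupLoopA (words.length + 1) words 1 = chunksRef words 0 := by
    simpa using loopA_eq_chunksRef (words.length + 1) words 0 (by omega)
  rw [hA, foldB_eq words [] 0 [] (by simp)]
  by_cases hw : words = []
  · simp [hw, chunksRef]
  · conv_lhs => rw [chunksRef]
    simp [hw]

-- ===== VERDICT (by name: the statement is the Claim_ definition above) =====
theorem sort_group_words_spec : Claim_equal_sort_group_words := by
  intro code_dict _
  exact main_eq _
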